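-- pv_equiv track=rewrite | github.com/whorn/Rooted-Tree-Maps | classes.py | generate_Words_Hy
-- ===== SOURCE A (Python) =====
-- def generate_Words(length):
--     word_list = []
--     if length == 2:
--         return ["xy"]
--     for n in range(int(2**(length-2))):
--         binary = bin(n)[2:]
--         binary = "0"*(length-len(binary)-2) + binary
--         current_word = ""
--         for b in binary:
--             if b == "0":
--                 current_word += "x"
--             else:
--                 current_word += "y"
--         current_word = "x" + current_word + "y"
--         word_list.append(current_word)
--     return word_list
--
-- def generate_Words_Hy(length):
--     admissible = generate_Words(length)
--     word_list = []
--     if length == 1: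
--         return ["y"]
--     for word in admissible:
--         word_list.append(word)
--         word_list.append("y"+word[1:])
--     return word_list
-- ===== SOURCE B (Python) =====
-- def generate_Words_Hy(length):
--     if length == 1:
--         return ["y"]
--     if length < 2:
--         return []
--     mids = [""]
--     for _ in range(length - 2):
--         mids = [c + m for c in "xy" for m in mids]
--     return [p + m + "y" for m in mids for p in "xy"]
-- ===== Notes on version B (the rewrite author's own statement) =====
-- stated objective: simpler
-- what changed: Replaces the integer-to-binary-string decoding loop (range(2**(length-2)), bin(n), zero-padding, per-character translation) and the separate generate_Words helper with a single function that builds the lexicographic x/y middles by list doubling and emits each x-word/y-word pair in one comprehension.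
import Mathlib
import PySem

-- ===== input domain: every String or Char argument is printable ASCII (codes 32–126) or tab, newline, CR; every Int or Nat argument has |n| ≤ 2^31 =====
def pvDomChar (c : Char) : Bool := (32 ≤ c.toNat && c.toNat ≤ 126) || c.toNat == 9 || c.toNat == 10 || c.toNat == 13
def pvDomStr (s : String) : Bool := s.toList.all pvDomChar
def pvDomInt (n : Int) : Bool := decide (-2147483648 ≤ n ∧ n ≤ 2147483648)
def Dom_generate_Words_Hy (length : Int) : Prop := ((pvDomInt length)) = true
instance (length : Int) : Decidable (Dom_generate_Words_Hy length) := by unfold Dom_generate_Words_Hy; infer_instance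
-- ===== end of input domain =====

-- B replaces A's integer-to-binary decoding pipeline with one list-doubling enumeration; objective: simpler.

-- ===== PORT A =====
-- bin(n)[2:] for n ≥ 1, as a list of '0'/'1' chars (most significant first); exact for Nat n
def pvBin : Nat → List Char
  | 0 => []
  | n+1 => pvBin ((n+1)/2) ++ [if (n+1) % 2 = 0 then '0' else '1']
decreasing_by exact Nat.div_lt_self (Nat.succ_pos n) one_lt_two

-- bin(n)[2:] including bin(0)[2:] = "0"
def pvBinDigits (n : Nat) : List Char := if n = 0 then ['0'] else pvBin n

-- helper generate_Words; words kept as List Char (a Python str), wrapped by String.mk in generate_Words_Hy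
def generate_Words (length : Int) : List (List Char) :=
  if length = 2 then [['x','y']]
  else
    -- int(2**(length-2)): for length < 2 Python computes a float in (0,1) and int() truncates it to 0; exact for int length
    let count : Nat := if 2 ≤ length then 2 ^ (length - 2).toNat else 0
    (List.range count).foldl (fun word_list n =>
      let binary := pvBinDigits n
      -- "0"*(length-len(binary)-2) + binary ; Python's str*negative = "", matched by Int.toNat clamping
      let binary := List.replicate (length - (binary.length : Int) - 2).toNat '0' ++ binary
      let current_word := binary.foldl (fun cw b => cw ++ [if b = '0' then 'x' else 'y']) []
      word_list ++ ['x' :: current_word ++ ['y']]) []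

def generate_Words_Hy (length : Int) : List String :=
  let admissible := generate_Words length
  if length = 1 then ["y"]
  else admissible.foldl (fun wl word =>
      -- word[1:] with nonnegative start = drop 1 (exact)
      wl ++ [String.mk word, String.mk ('y' :: word.drop 1)]) []

-- ===== PORT B =====
def generate_Words_Hy_alt (length : Int) : List String :=
  if length = 1 then ["y"]
  else if length < 2 then []
  else
    let mids := (List.range (length - 2).toNat).foldl
      (fun mids _ => ['x', 'y'].flatMap (fun c => mids.map (fun m => c :: m))) [[]]
    mids.flatMap (fun m => ['x', 'y'].map (fun p => String.mk (p :: m ++ ['y'])))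

-- ===== PRECONDITION & SPEC =====
def Spec_generate_Words_Hy (length : Int) (out : List String) : Prop := out = generate_Words_Hy_alt length
instance (length : Int) (out : List String) : Decidable (Spec_generate_Words_Hy length out) := by unfold Spec_generate_Words_Hy; infer_instance

-- ===== CLAIM (what is proved, stated in full; the proofs are below) =====
def Claim_equal_generate_Words_Hy : Prop := ∀ (length : Int), Dom_generate_Words_Hy length → Spec_generate_Words_Hy length (generate_Words_Hy length)

-- ===== LEMMAS AND PROOFS =====

-- MSB-first fixed-width binary decode, width k, digits '0'/'1'
def decB : Nat → Nat → List Char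
  | 0, _ => []
  | k+1, n => decB k (n / 2) ++ [if n % 2 = 0 then '0' else '1']

theorem decB_zero (k : Nat) : decB k 0 = List.replicate k '0' := by
  induction k with
  | zero => rfl
  | succ k ih => simp [decB, ih, List.replicate_succ']

-- A's padded bin-string equals the fixed-width decode
theorem pad_eq_decB (k : Nat) : ∀ n : Nat, n < 2 ^ k → 1 ≤ k →
    List.replicate (k - (pvBinDigits n).length) '0' ++ pvBinDigits n = decB k n := by
  induction k with
  | zero => intro n _ h; omega
  | succ k ih =>
    intro n hn _
    by_cases h0 : n = 0
    · subst h0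
      simp [pvBinDigits, decB, decB_zero, List.replicate_succ']
    · rw [pvBinDigits, if_neg h0]
      match n, h0 with
      | n+1, _ =>
        rw [pvBin]
        by_cases h2 : (n+1)/2 = 0
        · have h1 : n = 0 := by omega
          subst h1
          simp [decB, decB_zero, pvBin, List.replicate_succ']
        · have hp : (2:Nat) ^ (k+1) = 2 ^ k * 2 := pow_succ 2 k
          have hk : 1 ≤ k := by
            by_contra hk
            have hk0 : k = 0 := by omega
            rw [hk0] at hn
            norm_num at hn
            omega
          have hlt : (n+1)/2 < 2 ^ k := by omega
          have hih := ih ((n+1)/2) hlt hk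
          rw [pvBinDigits, if_neg h2] at hih
          have hlen : ((pvBin ((n+1)/2)) ++ [if (n+1) % 2 = 0 then '0' else '1']).length
              = (pvBin ((n+1)/2)).length + 1 := by simp
          have h2' : k + 1 - ((pvBin ((n+1)/2)).length + 1) = k - (pvBin ((n+1)/2)).length := by
            omega
          rw [decB, ← hih, hlen, h2']
          simp

-- MSB split: prefixing a bit
theorem decB_split (k : Nat) : ∀ n : Nat, n < 2 ^ k →
    decB (k+1) n = '0' :: decB k n ∧ decB (k+1) (2 ^ k + n) = '1' :: decB k n := by
  induction k with
  | zero =>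
    intro n hn
    have : n = 0 := by omega
    subst this
    exact ⟨rfl, rfl⟩
  | succ k ih =>
    intro n hn
    have hp : (2:Nat) ^ (k+1) = 2 ^ k * 2 := pow_succ 2 k
    have hp2 : (2:Nat) ^ (k+2) = 2 ^ (k+1) * 2 := pow_succ 2 (k+1)
    have hd : n / 2 < 2 ^ k := by omega
    constructor
    · have h1 := (ih (n/2) hd).1
      rw [decB, h1, decB]
      simp
    · have hdiv : (2 ^ (k+1) + n) / 2 = 2 ^ k + n / 2 := by omega
      have hmod : (2 ^ (k+1) + n) % 2 = n % 2 := by omega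
      rw [decB, hdiv, hmod, (ih (n/2) hd).2, decB]
      simp

def xyc (c : Char) : Char := if c = '0' then 'x' else 'y'

-- B's doubling fold
def midsF (k : Nat) : List (List Char) :=
  (List.range k).foldl (fun mids _ => ['x', 'y'].flatMap (fun c => mids.map (fun m => c :: m))) [[]]

theorem midsF_succ (k : Nat) :
    midsF (k+1) = (midsF k).map ('x' :: ·) ++ (midsF k).map ('y' :: ·) := by
  unfold midsF
  rw [List.range_succ, List.foldl_append]
  simp [List.flatMap]

theorem range_decB_eq_midsF (k : Nat) :
    (List.range (2 ^ k)).map (fun n => (decB k n).map xyc) = midsF k := by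
  induction k with
  | zero => rfl
  | succ k ih =>
    have hsplit : (2:Nat) ^ (k+1) = 2 ^ k + 2 ^ k := by ring
    rw [hsplit, List.range_add, List.map_append, midsF_succ, ← ih]
    congr 1
    · rw [List.map_map]
      apply List.map_congr_left
      intro n hn
      rw [List.mem_range] at hn
      simp only [Function.comp_def]
      rw [(decB_split k n hn).1]
      simp [xyc]
    · rw [List.map_map, List.map_map]
      apply List.map_congr_left
      intro n hn
      rw [List.mem_range] at hn
      simp only [Function.comp_def]
      rw [(decB_split k n hn).2]
      simp [xyc]

-- generate_Words on length = k+2 (k ≥ 1) is the list of 'x'-headed decoded words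
theorem gw_eq (k : Nat) (hk : 1 ≤ k) :
    generate_Words ((k:Int)+2)
      = (List.range (2^k)).map (fun n => 'x' :: ((decB k n).map xyc ++ ['y'])) := by
  have hne : ¬((k:Int)+2 = 2) := by omega
  have hle : (2:Int) ≤ (k:Int)+2 := by omega
  have hknat : ((k:Int)+2-2).toNat = k := by omega
  simp only [generate_Words, if_neg hne, if_pos hle, hknat,
    PySem.List.foldl_append_singleton_eq_map, List.nil_append]
  apply List.map_congr_left
  intro n hn
  rw [List.mem_range] at hn
  have harg : ((k:Int)+2 - ((pvBinDigits n).length:Int) - 2).toNat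
      = k - (pvBinDigits n).length := by omega
  rw [harg, pad_eq_decB k n hn hk]
  rfl

-- the two ports agree for length ≥ 3
theorem main3 (length : Int) (h3 : 3 ≤ length) :
    generate_Words_Hy length = generate_Words_Hy_alt length := by
  set k := (length-2).toNat with hkdef
  have hk : 1 ≤ k := by omega
  have hlen : length = (k:Int)+2 := by omega
  rw [hlen]
  have h1 : ¬((k:Int)+2 = 1) := by omega
  have h2 : ¬((k:Int)+2 < 2) := by omega
  have hknat : ((k:Int)+2-2).toNat = k := by omega
  simp only [generate_Words_Hy, if_neg h1, gw_eq k hk,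
    PySem.List.foldl_append_eq_flatMap, List.nil_append]
  simp only [generate_Words_Hy_alt, if_neg h1, if_neg h2, hknat]
  have hmids : (List.range k).foldl
      (fun mids _ => ['x', 'y'].flatMap (fun c => mids.map (fun m => c :: m))) [[]]
      = midsF k := rfl
  rw [hmids, ← range_decB_eq_midsF k]
  simp only [List.flatMap_map]
  congr 1

-- ===== VERDICT (by name: the statement is the Claim_ definition above) =====
theorem generate_Words_Hy_spec : Claim_equal_generate_Words_Hy := by
  intro length _
  unfold Spec_generate_Words_Hy
  by_cases h1 : length = 1
  · subst h1; decide
  by_cases h2 : length = 2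
  · subst h2; decide
  by_cases hlt : length < 2
  · have hn2 : ¬(2 ≤ length) := by omega
    simp [generate_Words_Hy, generate_Words_Hy_alt, generate_Words, h1, h2, hlt, hn2]
  · exact main3 length (by omega)
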